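-- pv_equiv track=rewrite | github.com/bhi5hmaraj/APRG-2020 | gen.py | solve
-- ===== SOURCE A (Python) =====
-- import random, collections
--
-- def solve(tc):
-- 	ans = []
-- 	ds = collections.defaultdict(int)
--
-- 	for test in tc:
-- 		if len(test) == 1:
-- 			ds[test[0]] += 1
-- 		else:
-- 			ans.append(sum(map(lambda pair: pair[1] if pair[0] >= test[0] and pair[0] <= test[1] else 0, ds.items())))
--
-- 	return ans
-- ===== SOURCE B (Python) =====
-- import bisect
--
-- def solve(tc):
--     ans = []
--     keys = []  # sorted multiset of all inserted values
--     for test in tc: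
--         if len(test) == 1:
--             bisect.insort(keys, test[0])
--         else:
--             lo = bisect.bisect_left(keys, test[0])
--             hi = bisect.bisect_right(keys, test[1])
--             ans.append(max(hi - lo, 0))
--     return ans
-- ===== Notes on version B (the rewrite author's own statement) =====
-- stated objective: alternative
-- what changed: Replaces the hash-map of counts with an ordered multiset: values go into a list kept sorted by bisect.insort and each range query becomes a difference of two binary-search prefix positions instead of a scan summing over every stored dict entry.
-- outside the precondition, e.g. on solve([[]]): A returns [0], B raises IndexError
import Mathlib
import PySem

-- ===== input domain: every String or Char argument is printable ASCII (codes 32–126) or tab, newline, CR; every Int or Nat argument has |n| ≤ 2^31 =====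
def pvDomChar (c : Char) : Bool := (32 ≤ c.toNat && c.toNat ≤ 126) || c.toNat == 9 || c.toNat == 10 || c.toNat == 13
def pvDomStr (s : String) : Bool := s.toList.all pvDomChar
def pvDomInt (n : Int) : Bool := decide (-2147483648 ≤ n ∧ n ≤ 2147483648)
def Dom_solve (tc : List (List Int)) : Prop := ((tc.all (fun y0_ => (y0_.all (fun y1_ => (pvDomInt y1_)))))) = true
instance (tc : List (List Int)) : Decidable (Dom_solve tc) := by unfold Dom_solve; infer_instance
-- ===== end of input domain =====

-- B replaces A's per-query scan over all dict entries by a sorted insertion list with two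
-- binary searches per query (objective: alternative data structure, same measured cost).

-- ===== PORT A =====
-- loop body of A's 'for test in tc' (ans, ds) — test[0]/test[1] via pyGetD; Pre_solve
-- excludes the empty inner lists, the only place Python's test[0] would raise IndexError,
-- so the default is never read on admitted inputs.
def solveStep (st : List Int × PySem.Dict Int Int) (test : List Int) :
    List Int × PySem.Dict Int Int :=
  if test.length = 1 then
    -- ds[test[0]] += 1  (defaultdict(int): read 0 when absent, new key appended)
    (st.1, st.2.insert (PySem.List.pyGetD test 0 0)
                       (st.2.getD (PySem.List.pyGetD test 0 0) 0 + 1))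
  else
    -- ans.append(sum(map(lambda pair: pair[1] if pair[0] >= test[0] and pair[0] <= test[1] else 0, ds.items())))
    (st.1 ++ [(st.2.items.map (fun p =>
        if p.1 ≥ PySem.List.pyGetD test 0 0 ∧ p.1 ≤ PySem.List.pyGetD test 1 0
        then p.2 else 0)).sum],
     st.2)

def solve (tc : List (List Int)) : List Int :=
  (tc.foldl solveStep ([], PySem.Dict.empty)).1

-- ===== PORT B =====
-- loop body of B's 'for test in tc' (ans, keys).  bisect.insort is ported as Mathlib's
-- List.orderedInsert (exact on Int values: equal elements are indistinguishable), and
-- bisect.bisect_left / bisect_right as PySem.List.bisectLeft / bisectRight.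
def solveAltStep (st : List Int × List Int) (test : List Int) : List Int × List Int :=
  if test.length = 1 then
    (st.1, List.orderedInsert (· ≤ ·) (PySem.List.pyGetD test 0 0) st.2)
  else
    let lo : Int := PySem.List.bisectLeft st.2 (PySem.List.pyGetD test 0 0)
    let hi : Int := PySem.List.bisectRight st.2 (PySem.List.pyGetD test 1 0)
    (st.1 ++ [max (hi - lo) 0], st.2)

def solve_alt (tc : List (List Int)) : List Int :=
  (tc.foldl solveAltStep ([], [])).1

-- ===== PRECONDITION & SPEC =====
-- Pre_ excludes inputs containing an empty inner list: there A's query branch raises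
-- IndexError (test[0]) as soon as the dict is nonempty, and while the dict is still empty
-- it returns an accidental 0 because the lambda reading test[0] is never evaluated;
-- B's eager bisect raises IndexError on every such input.
def Pre_solve (tc : List (List Int)) : Prop := ∀ t ∈ tc, t ≠ []
instance (tc : List (List Int)) : Decidable (Pre_solve tc) := by unfold Pre_solve; infer_instance

def pvWitness_solve : List (List Int) := [[1], [3], [1, 5], [2], [0, 10], [4, 2]]

def Spec_solve (tc : List (List Int)) (out : List Int) : Prop := out = solve_alt tc
instance (tc : List (List Int)) (out : List Int) : Decidable (Spec_solve tc out) := by unfold Spec_solve; infer_instance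

-- ===== CLAIM (what is proved, stated in full; the proofs are below) =====
def Claim_equal_solve : Prop := ∀ (tc : List (List Int)), Dom_solve tc → Pre_solve tc → Spec_solve tc (solve tc)

-- ===== LEMMAS AND PROOFS =====

-- Over a nodup key list containing x, the 0/1 indicator sum at x picks out one term.
lemma sum_indicator_single (p : Int → Prop) [DecidablePred p] (x : Int) :
    ∀ (ks : List Int), ks.Nodup → x ∈ ks →
      (ks.map (fun k => if p k ∧ k = x then (1 : Int) else 0)).sum
        = if p x then 1 else 0 := by
  intro ks
  induction ks with
  | nil => intro _ h; cases h
  | cons k ks ih =>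
    intro hnd hx
    rcases List.nodup_cons.mp hnd with ⟨hk, hnd'⟩
    simp only [List.map_cons, List.sum_cons]
    by_cases hkx : k = x
    · subst hkx
      have hz : (ks.map (fun k' => if p k' ∧ k' = k then (1 : Int) else 0)).sum = 0 := by
        rw [List.sum_eq_zero]
        intro y hy
        rcases List.mem_map.mp hy with ⟨k', hk', rfl⟩
        have : ¬(p k' ∧ k' = k) := fun h => hk (h.2 ▸ hk')
        simp [this]
      rw [hz]
      simp
    · have hx' : x ∈ ks := by
        rcases hx with _ | h
        · exact absurd rfl hkx
        · assumption
      have : ¬(p k ∧ k = x) := fun h => hkx h.2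
      rw [ih hnd' hx']
      simp [this]

-- Summing counts over any nodup superset of xs's elements is counting in xs.
lemma sum_counts (p : Int → Prop) [DecidablePred p] :
    ∀ (xs ks : List Int), ks.Nodup → (∀ x ∈ xs, x ∈ ks) →
      (ks.map (fun k => if p k then (xs.count k : Int) else 0)).sum
        = (xs.countP (fun x => decide (p x)) : Int) := by
  intro xs
  induction xs with
  | nil => intro ks _ _; simp
  | cons x xs ih =>
    intro ks hnd hsub
    have hx : x ∈ ks := hsub x (List.mem_cons_self)
    have hsub' : ∀ y ∈ xs, y ∈ ks := fun y hy => hsub y (List.mem_cons_of_mem x hy)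
    have hstep : (ks.map (fun k => if p k then ((x :: xs).count k : Int) else 0))
        = ks.map (fun k => (if p k then (xs.count k : Int) else 0)
            + (if p k ∧ k = x then (1 : Int) else 0)) := by
      apply List.map_congr_left
      intro k _
      rw [List.count_cons]
      split_ifs <;> simp_all
      rename_i hpx hconj
      exact hpx (hconj.2 ▸ hconj.1)
    rw [hstep, PySem.List.sum_map_add_int, ih ks hnd hsub',
        sum_indicator_single p x ks hnd hx, List.countP_cons]
    by_cases hp : p x <;> simp [hp]

-- A's per-query scan over the counter dict counts the inserted values in [l, r].
lemma query_sum_counter (xs : List Int) (l r : Int) :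
    ((PySem.Dict.counter xs).items.map (fun p =>
        if p.1 ≥ l ∧ p.1 ≤ r then p.2 else 0)).sum
      = (xs.countP (fun x => decide (l ≤ x ∧ x ≤ r)) : Int) := by
  rw [PySem.Dict.items_counter, List.map_map]
  have := sum_counts (fun k => l ≤ k ∧ k ≤ r) xs (PySem.Set.ofList xs)
    (PySem.Set.nodup_ofList xs) (fun x hx => (PySem.Set.mem_ofList xs x).mpr hx)
  simpa [Function.comp, ge_iff_le] using this

-- bisect_left on a sorted list counts the elements below x.
lemma bisectLeft_eq_countP (s : List Int) (h : s.Pairwise (· ≤ ·)) (x : Int) :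
    PySem.List.bisectLeft s x = s.countP (fun y => decide (y < x)) := by
  obtain ⟨hle, hlt, hge⟩ := PySem.List.bisectLeft_spec s x h
  set n := PySem.List.bisectLeft s x with hn
  have hsplit : s.countP (fun y => decide (y < x))
      = (s.take n).countP (fun y => decide (y < x))
        + (s.drop n).countP (fun y => decide (y < x)) := by
    rw [← List.countP_append, List.take_append_drop]
  have htake : (s.take n).countP (fun y => decide (y < x)) = (s.take n).length := by
    rw [List.countP_eq_length]
    intro a ha
    rcases List.mem_iff_getElem.mp ha with ⟨j, hj, rfl⟩
    have hjn : j < n := lt_of_lt_of_le hj (by simp)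
    have hjs : j < s.length := lt_of_lt_of_le hj (by simp [List.length_take])
    have := hlt j hjs hjn
    simp [List.getElem_take] at this ⊢
    omega
  have hdrop : (s.drop n).countP (fun y => decide (y < x)) = 0 := by
    rw [List.countP_eq_zero]
    intro a ha
    rcases List.mem_iff_getElem.mp ha with ⟨j, hj, rfl⟩
    have hjs : n + j < s.length := by simp [List.length_drop] at hj; omega
    have := hge (n + j) hjs (Nat.le_add_right n j)
    simp [List.getElem_drop] at this ⊢
    omega
  rw [hsplit, htake, hdrop, List.length_take]
  omega

-- bisect_right on a sorted list counts the elements ≤ x.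
lemma bisectRight_eq_countP (s : List Int) (h : s.Pairwise (· ≤ ·)) (x : Int) :
    PySem.List.bisectRight s x = s.countP (fun y => decide (y ≤ x)) := by
  obtain ⟨hle, hlt, hge⟩ := PySem.List.bisectRight_spec s x h
  set n := PySem.List.bisectRight s x with hn
  have hsplit : s.countP (fun y => decide (y ≤ x))
      = (s.take n).countP (fun y => decide (y ≤ x))
        + (s.drop n).countP (fun y => decide (y ≤ x)) := by
    rw [← List.countP_append, List.take_append_drop]
  have htake : (s.take n).countP (fun y => decide (y ≤ x)) = (s.take n).length := by
    rw [List.countP_eq_length]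
    intro a ha
    rcases List.mem_iff_getElem.mp ha with ⟨j, hj, rfl⟩
    have hjn : j < n := lt_of_lt_of_le hj (by simp)
    have hjs : j < s.length := lt_of_lt_of_le hj (by simp [List.length_take])
    have := hlt j hjs hjn
    simp [List.getElem_take] at this ⊢
    omega
  have hdrop : (s.drop n).countP (fun y => decide (y ≤ x)) = 0 := by
    rw [List.countP_eq_zero]
    intro a ha
    rcases List.mem_iff_getElem.mp ha with ⟨j, hj, rfl⟩
    have hjs : n + j < s.length := by simp [List.length_drop] at hj; omega
    have := hge (n + j) hjs (Nat.le_add_right n j)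
    simp [List.getElem_drop] at this ⊢
    omega
  rw [hsplit, htake, hdrop, List.length_take]
  omega

-- The clamped difference of the two prefix counts is the in-range count.
lemma range_count (s : List Int) (l r : Int) :
    max ((s.countP (fun y => decide (y ≤ r)) : Int)
          - (s.countP (fun y => decide (y < l)) : Int)) 0
      = (s.countP (fun x => decide (l ≤ x ∧ x ≤ r)) : Int) := by
  by_cases hlr : l ≤ r
  · have key : s.countP (fun x => decide (l ≤ x ∧ x ≤ r))
        + s.countP (fun y => decide (y < l)) = s.countP (fun y => decide (y ≤ r)) := by
      induction s with
      | nil => simp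
      | cons a s ih =>
        simp only [List.countP_cons, decide_eq_true_eq]
        split_ifs <;> omega
    have h2 : (s.countP (fun y => decide (y < l)) : Int)
        ≤ (s.countP (fun y => decide (y ≤ r)) : Int) := by
      exact_mod_cast List.countP_mono_left (fun x _ hx => by
        simp at hx ⊢; omega)
    omega
  · have h0 : s.countP (fun x => decide (l ≤ x ∧ x ≤ r)) = 0 := by
      rw [List.countP_eq_zero]; intro a _; simp; omega
    have h2 : (s.countP (fun y => decide (y ≤ r)) : Int)
        ≤ (s.countP (fun y => decide (y < l)) : Int) := by
      exact_mod_cast List.countP_mono_left (fun x _ hx => by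
        simp at hx ⊢; omega)
    omega

-- Main loop invariant: A carries the counter of the inserted values, B a sorted
-- permutation of them; both loops extend ans identically.
lemma loop_eq (tc : List (List Int)) :
    ∀ (acc xs s : List Int), (∀ t ∈ tc, t ≠ []) → s.Perm xs → s.Pairwise (· ≤ ·) →
      (tc.foldl solveStep (acc, PySem.Dict.counter xs)).1
        = (tc.foldl solveAltStep (acc, s)).1 := by
  induction tc with
  | nil => intro acc xs s _ _ _; rfl
  | cons t ts ih =>
    intro acc xs s hpre hperm hsort
    have hpre' : ∀ u ∈ ts, u ≠ [] := fun u hu => hpre u (List.mem_cons_of_mem t hu)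
    by_cases hlen : t.length = 1
    · -- insertion step
      set k := PySem.List.pyGetD t 0 0 with hk
      have hA : solveStep (acc, PySem.Dict.counter xs) t
          = (acc, PySem.Dict.counter (xs ++ [k])) := by
        rw [PySem.Dict.counter_append_singleton]
        unfold solveStep
        rw [if_pos hlen]
        rfl
      have hB : solveAltStep (acc, s) t
          = (acc, List.orderedInsert (· ≤ ·) k s) := by
        unfold solveAltStep
        rw [if_pos hlen]
      rw [List.foldl_cons, List.foldl_cons, hA, hB]
      exact ih acc (xs ++ [k]) _ hpre'
        (((List.perm_orderedInsert _ k s).trans (hperm.cons k)).trans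
          (List.perm_append_singleton k xs).symm)
        (List.Pairwise.orderedInsert k s hsort)
    · -- query step: both append the same count
      set l := PySem.List.pyGetD t 0 0 with hl
      set r := PySem.List.pyGetD t 1 0 with hr
      have hq : ((PySem.Dict.counter xs).items.map (fun p =>
            if p.1 ≥ l ∧ p.1 ≤ r then p.2 else 0)).sum
          = max ((PySem.List.bisectRight s r : Int) - (PySem.List.bisectLeft s l : Int)) 0 := by
        rw [query_sum_counter, bisectRight_eq_countP s hsort, bisectLeft_eq_countP s hsort,
            range_count]
        congr 1
        exact (hperm.countP_eq _).symm
      rw [List.foldl_cons, List.foldl_cons]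
      have hA : solveStep (acc, PySem.Dict.counter xs) t
          = (acc ++ [max ((PySem.List.bisectRight s r : Int)
              - (PySem.List.bisectLeft s l : Int)) 0], PySem.Dict.counter xs) := by
        simp only [solveStep, hlen, if_false, ← hl, ← hr, hq]
      have hB : solveAltStep (acc, s) t
          = (acc ++ [max ((PySem.List.bisectRight s r : Int)
              - (PySem.List.bisectLeft s l : Int)) 0], s) := by
        simp only [solveAltStep, hlen, if_false, ← hl, ← hr]
      rw [hA, hB]
      exact ih _ xs s hpre' hperm hsort

-- ===== VERDICT (by name: the statement is the Claim_ definition above) =====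
theorem solve_spec : Claim_equal_solve := by
  intro tc _dom hpre
  unfold Spec_solve solve solve_alt
  have : PySem.Dict.counter ([] : List Int) = (PySem.Dict.empty : PySem.Dict Int Int) := rfl
  rw [← this]
  exact loop_eq tc [] [] [] hpre (List.Perm.refl []) List.Pairwise.nil
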